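-- pv_equiv track=rewrite | github.com/t0r1n88/Lachesis | group_climate/shumakova_okk.py | calc_value_vou
-- ===== SOURCE A (Python) =====
-- def calc_value_vou(row):
--     """
--     Функция для подсчета значения
--     :return: число
--     """
--     lst_pr = [12,30,31,32]
--     lst_neg = [12,30]
--     value_forward = 0  # результат
--     for idx, value in enumerate(row,1):
--         if idx in lst_pr:
--             if idx not in lst_neg:
--                 value_forward += value
--             else:
--                 if value == 0:
--                     value_forward += 3
--                 elif value == 1:
--                     value_forward += 2
--                 elif value == 2:
--                     value_forward += 1
--                 elif value == 3:
--                     value_forward += 0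
--
--
--     return value_forward
-- ===== SOURCE B (Python) =====
-- def calc_value_vou(row):
--     """
--     Функция для подсчета значения
--     :return: число
--     """
--     def neg(v):
--         return 3 - v if 0 <= v <= 3 else 0
--     n = len(row)
--     total = 0
--     if n > 11:
--         total += neg(row[11])
--     if n > 29:
--         total += neg(row[29])
--     if n > 30:
--         total += row[30]
--     if n > 31:
--         total += row[31]
--     return total
-- ===== Notes on version B (the rewrite author's own statement) =====
-- stated objective: simpler
-- what changed: Replaced the full enumerate-loop with membership tests by direct length-guarded access to the four relevant positions (0-based 11, 29, 30, 31), with the inverted 0..3 scoring expressed as the closed form 3 - v.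
import Mathlib
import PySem

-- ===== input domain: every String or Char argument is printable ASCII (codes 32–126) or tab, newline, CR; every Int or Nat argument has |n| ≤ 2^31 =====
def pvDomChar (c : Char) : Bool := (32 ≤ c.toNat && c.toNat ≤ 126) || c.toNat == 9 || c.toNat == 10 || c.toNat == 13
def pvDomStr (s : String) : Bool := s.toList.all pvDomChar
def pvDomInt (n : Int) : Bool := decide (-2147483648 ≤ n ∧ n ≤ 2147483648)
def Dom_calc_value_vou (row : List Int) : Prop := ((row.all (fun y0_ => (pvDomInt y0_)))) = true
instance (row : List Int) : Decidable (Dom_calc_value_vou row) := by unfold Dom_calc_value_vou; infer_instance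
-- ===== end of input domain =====

-- B replaces A's enumerate-loop with direct length-guarded access to the four scored
-- positions (0-based 11, 29, 30, 31), writing the inverted 0..3 scoring as 3 - v (simpler).


-- ===== PORT A =====
-- one iteration of the Python for-loop body: idx is the 1-based position
def vouStep (idx : Int) (value : Int) (vf : Int) : Int :=
  if [(12:Int),30,31,32].contains idx then
    if ¬ [(12:Int),30].contains idx then
      vf + value
    else
      if value == 0 then vf + 3
      else if value == 1 then vf + 2
      else if value == 2 then vf + 1
      else if value == 3 then vf + 0
      else vf
  else vf

-- the for-loop over enumerate(row, 1)
def vouLoop (idx : Int) (vf : Int) : List Int → Int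
  | [] => vf
  | v :: rest => vouLoop (idx + 1) (vouStep idx v vf) rest

def calc_value_vou (row : List Int) : Int := vouLoop 1 0 row

-- ===== PORT B =====
def vouNeg (v : Int) : Int := if 0 ≤ v ∧ v ≤ 3 then 3 - v else 0

def calc_value_vou_alt (row : List Int) : Int :=
  (if 11 < row.length then vouNeg (row.getD 11 0) else 0)
  + (if 29 < row.length then vouNeg (row.getD 29 0) else 0)
  + (if 30 < row.length then row.getD 30 0 else 0)
  + (if 31 < row.length then row.getD 31 0 else 0)

-- ===== PRECONDITION & SPEC =====
def Spec_calc_value_vou (row : List Int) (out : Int) : Prop := out = calc_value_vou_alt row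
instance (row : List Int) (out : Int) : Decidable (Spec_calc_value_vou row out) := by unfold Spec_calc_value_vou; infer_instance

-- ===== CLAIM (what is proved, stated in full; the proofs are below) =====
def Claim_equal_calc_value_vou : Prop := ∀ (row : List Int), Dom_calc_value_vou row → Spec_calc_value_vou row (calc_value_vou row)

-- ===== LEMMAS AND PROOFS =====

-- contribution of the tail of the row when its first element has 1-based position idx:
-- picks out the absolute positions 12, 30 (inverted) and 31, 32 (raw) if still inside
def vouAt (row : List Int) (k : Int) (f : Int → Int) : Int :=
  if 0 ≤ k ∧ k.toNat < row.length then f (row.getD k.toNat 0) else 0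

def vouContrib (idx : Int) (row : List Int) : Int :=
  vouAt row (12 - idx) vouNeg + vouAt row (30 - idx) vouNeg
  + vouAt row (31 - idx) id + vouAt row (32 - idx) id

theorem vouAt_neg (row : List Int) (k : Int) (f : Int → Int) (h : k < 0) :
    vouAt row k f = 0 := by
  unfold vouAt; rw [if_neg (by omega)]

theorem vouAt_cons (v : Int) (rest : List Int) (k : Int) (f : Int → Int) :
    vouAt (v :: rest) k f = if k = 0 then f v else vouAt rest (k - 1) f := by
  unfold vouAt
  rcases lt_trichotomy k 0 with h | h | h
  · rw [if_neg (by omega), if_neg (by omega : ¬ k = 0), if_neg (by omega)]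
  · subst h; simp
  · rw [if_neg (by omega : ¬ k = 0)]
    have hk : k.toNat = (k - 1).toNat + 1 := by omega
    by_cases hlt : (k - 1).toNat < rest.length
    · rw [if_pos (by simp; omega), if_pos (by omega), hk]
      simp [List.getD]
    · rw [if_neg (by simp; omega), if_neg (by omega)]

theorem vouStep_eq (idx v vf : Int) :
    vouStep idx v vf = vf +
      ((if idx = 12 ∨ idx = 30 then vouNeg v else 0) +
       (if idx = 31 ∨ idx = 32 then v else 0)) := by
  by_cases h12 : idx = 12
  · subst h12; simp only [vouStep, vouNeg]; norm_num
    split_ifs <;> omega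
  · by_cases h30 : idx = 30
    · subst h30; simp only [vouStep, vouNeg]; norm_num
      split_ifs <;> omega
    · by_cases h31 : idx = 31
      · subst h31; simp only [vouStep]; norm_num
      · by_cases h32 : idx = 32
        · subst h32; simp only [vouStep]; norm_num
        · simp only [vouStep, List.contains_cons, List.contains_nil,
            Bool.or_eq_true, beq_iff_eq]
          rw [if_neg (show ¬(idx = 12 ∨ idx = 30 ∨ idx = 31 ∨ idx = 32 ∨ false = true) by
              simp [h12, h30, h31, h32]),
            if_neg (by omega : ¬ (idx = 12 ∨ idx = 30)),
            if_neg (by omega : ¬ (idx = 31 ∨ idx = 32))]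
          omega

theorem vouContrib_cons (idx v : Int) (rest : List Int) :
    vouContrib idx (v :: rest) =
      ((if idx = 12 ∨ idx = 30 then vouNeg v else 0) +
       (if idx = 31 ∨ idx = 32 then v else 0)) + vouContrib (idx + 1) rest := by
  unfold vouContrib
  rw [vouAt_cons, vouAt_cons, vouAt_cons, vouAt_cons]
  by_cases h12 : idx = 12
  · subst h12; norm_num
    rw [vouAt_neg rest (-1) vouNeg (by norm_num)]
    ring
  · by_cases h30 : idx = 30
    · subst h30; norm_num
      rw [vouAt_neg rest (-1) vouNeg (by norm_num)]
      ring
    · by_cases h31 : idx = 31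
      · subst h31; norm_num
        rw [vouAt_neg rest (-1) id (by norm_num)]
        ring
      · by_cases h32 : idx = 32
        · subst h32; norm_num
          rw [vouAt_neg rest (-1) id (by norm_num)]
          ring
        · rw [if_neg (by omega : ¬ (12:Int) - idx = 0), if_neg (by omega : ¬ (30:Int) - idx = 0),
            if_neg (by omega : ¬ (31:Int) - idx = 0), if_neg (by omega : ¬ (32:Int) - idx = 0),
            if_neg (by omega : ¬ (idx = 12 ∨ idx = 30)),
            if_neg (by omega : ¬ (idx = 31 ∨ idx = 32)),
            show (12:Int) - idx - 1 = 12 - (idx + 1) by ring,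
            show (30:Int) - idx - 1 = 30 - (idx + 1) by ring,
            show (31:Int) - idx - 1 = 31 - (idx + 1) by ring,
            show (32:Int) - idx - 1 = 32 - (idx + 1) by ring]
          ring

theorem vouLoop_eq (row : List Int) : ∀ (idx vf : Int),
    vouLoop idx vf row = vf + vouContrib idx row := by
  induction row with
  | nil => intro idx vf; simp [vouLoop, vouContrib, vouAt]
  | cons v rest ih =>
    intro idx vf
    rw [vouLoop, ih, vouStep_eq, vouContrib_cons]
    ring

theorem vouAt_nat_eq (row : List Int) (n : Nat) (f : Int → Int) :
    vouAt row (n : Int) f = if n < row.length then f (row.getD n 0) else 0 := by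
  unfold vouAt
  simp

-- ===== VERDICT (by name: the statement is the Claim_ definition above) =====
theorem calc_value_vou_spec : Claim_equal_calc_value_vou := by
  intro row _
  unfold Spec_calc_value_vou calc_value_vou calc_value_vou_alt
  rw [vouLoop_eq]
  unfold vouContrib
  have h11 := vouAt_nat_eq row 11 vouNeg
  have h29 := vouAt_nat_eq row 29 vouNeg
  have h30 := vouAt_nat_eq row 30 id
  have h31 := vouAt_nat_eq row 31 id
  norm_num at h11 h29 h30 h31 ⊢
  rw [h11, h29, h30, h31]
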